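-- pv_equiv track=rewrite | github.com/hcmut-cse/PDFMatching | endUserMatchingED.py | createStringList
-- ===== SOURCE A (Python) =====
-- def createStringList(CONFIG):
-- 	s=[]
-- 	checked={}
-- 	for key in CONFIG:
-- 		tmpKey=key
-- 		barPos=key.find('_')
-- 		if (barPos!=-1):
-- 			tmpKey=key[:barPos]
-- 		checked[tmpKey]=0
--
-- 	for key in CONFIG:
-- 		tmpKey=key
-- 		if (key.find('_')!=-1):
-- 			barPos=key.find('_')
-- 			tmpKey=key[:barPos]
-- 		if (not checked[tmpKey]):
-- 			s.append(tmpKey)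
-- 			checked[tmpKey]=1
-- 	return s
-- ===== SOURCE B (Python) =====
-- def createStringList(CONFIG):
-- 	s = []
-- 	for key in reversed(list(CONFIG)):
-- 		barPos = key.find('_')
-- 		p = key[:barPos] if barPos != -1 else key
-- 		s = [p] + [x for x in s if x != p]
-- 	return s
-- ===== Notes on version B (the rewrite author's own statement) =====
-- stated objective: alternative
-- what changed: Replaces A's two forward passes with a seen-flag dict by a single backward pass with no seen structure at all: each prefix is prepended and any later duplicate of it is filtered out of the accumulator, so first-occurrence order emerges from the reverse traversal.
import Mathlib
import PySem

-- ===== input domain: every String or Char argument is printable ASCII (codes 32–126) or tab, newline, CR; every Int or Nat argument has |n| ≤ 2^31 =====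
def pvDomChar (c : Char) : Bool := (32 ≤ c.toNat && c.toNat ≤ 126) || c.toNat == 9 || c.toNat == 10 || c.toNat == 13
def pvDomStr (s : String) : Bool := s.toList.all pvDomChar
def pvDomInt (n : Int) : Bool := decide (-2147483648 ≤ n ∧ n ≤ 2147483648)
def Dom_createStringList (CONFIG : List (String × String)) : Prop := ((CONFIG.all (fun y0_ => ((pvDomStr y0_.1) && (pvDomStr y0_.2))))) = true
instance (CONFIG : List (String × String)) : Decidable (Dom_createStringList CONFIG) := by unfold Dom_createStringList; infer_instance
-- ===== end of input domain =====

-- B is an alternative decomposition: one backward pass that prepends each prefix and filters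
-- its later duplicates from the accumulator, instead of A's two forward passes over a flag dict.

-- ===== PORT A =====
-- body of A's first loop (populates checked[prefix] = 0)
def createStringList_checkStep (checked : PySem.Dict String Int) (key : String) : PySem.Dict String Int :=
  let tmpKey := key
  let barPos := PySem.Str.find key "_"
  let tmpKey := if barPos ≠ -1 then PySem.Str.slice key none (some barPos) else tmpKey
  checked.insert tmpKey 0

-- body of A's second loop (appends unseen prefixes, flips the flag)
def createStringList_appendStep (acc : List String × PySem.Dict String Int) (key : String) :
    List String × PySem.Dict String Int :=
  let s := acc.1
  let checked := acc.2
  let tmpKey := key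
  let tmpKey :=
    if PySem.Str.find key "_" ≠ -1 then
      let barPos := PySem.Str.find key "_"
      PySem.Str.slice key none (some barPos)
    else tmpKey
  -- 'if not checked[tmpKey]': the flag is always present (first loop) and is 0 or 1
  if checked.getD tmpKey 0 = 0 then (s ++ [tmpKey], checked.insert tmpKey 1) else (s, checked)

def createStringList (CONFIG : List (String × String)) : List String :=
  let s : List String := []
  let checked :=
    ((PySem.Dict.ofList CONFIG).keys).foldl createStringList_checkStep PySem.Dict.empty
  (((PySem.Dict.ofList CONFIG).keys).foldl createStringList_appendStep (s, checked)).1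

-- ===== PORT B =====
-- p = key[:barPos] if barPos != -1 else key
def createStringList_prefixOf (key : String) : String :=
  let barPos := PySem.Str.find key "_"
  if barPos ≠ -1 then PySem.Str.slice key none (some barPos) else key

-- s = [p] + [x for x in s if x != p], for key in reversed(list(CONFIG))
def createStringList_altStep (s : List String) (key : String) : List String :=
  let p := createStringList_prefixOf key
  p :: s.filter (fun x => x != p)

def createStringList_alt (CONFIG : List (String × String)) : List String :=
  (((PySem.Dict.ofList CONFIG).keys).reverse).foldl createStringList_altStep []

-- ===== PRECONDITION & SPEC =====
def Spec_createStringList (CONFIG : List (String × String)) (out : List String) : Prop := out = createStringList_alt CONFIG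
instance (CONFIG : List (String × String)) (out : List String) : Decidable (Spec_createStringList CONFIG out) := by unfold Spec_createStringList; infer_instance

-- ===== CLAIM (what is proved, stated in full; the proofs are below) =====
def Claim_equal_createStringList : Prop := ∀ (CONFIG : List (String × String)), Dom_createStringList CONFIG → Spec_createStringList CONFIG (createStringList CONFIG)

-- ===== LEMMAS AND PROOFS =====

-- the first loop only ever stores 0, so every getD … 0 is 0
theorem createStringList_checked_zero (ks : List String) (d : PySem.Dict String Int)
    (h : ∀ p, d.getD p 0 = 0) (p : String) :
    (ks.foldl createStringList_checkStep d).getD p 0 = 0 := by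
  induction ks generalizing d with
  | nil => exact h p
  | cons k ks ih =>
      refine ih _ (fun q => ?_)
      simp only [createStringList_checkStep, PySem.Dict.getD_insert]
      split <;> simp [h]

-- loop invariant for A's second loop: s is exactly the set of prefixes seen so far
theorem createStringList_loop (ks : List String) (s : List String) (d : PySem.Dict String Int)
    (h : ∀ p, d.getD p 0 = 0 ↔ p ∉ s) :
    (ks.foldl createStringList_appendStep (s, d)).1 =
      (ks.map createStringList_prefixOf).foldl PySem.Set.add s := by
  induction ks generalizing s d with
  | nil => rfl
  | cons k ks ih =>
      simp only [List.foldl_cons, List.map_cons]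
      have hstep : createStringList_appendStep (s, d) k =
          if d.getD (createStringList_prefixOf k) 0 = 0 then
            (s ++ [createStringList_prefixOf k], d.insert (createStringList_prefixOf k) 1)
          else (s, d) := by
        simp only [createStringList_appendStep, createStringList_prefixOf]
      by_cases hz : d.getD (createStringList_prefixOf k) 0 = 0
      · rw [hstep, if_pos hz]
        have hnot : createStringList_prefixOf k ∉ s := (h _).mp hz
        have hadd : PySem.Set.add s (createStringList_prefixOf k)
            = s ++ [createStringList_prefixOf k] := by
          simp [PySem.Set.add, hnot]
        rw [hadd]
        refine ih _ _ (fun q => ?_)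
        rw [PySem.Dict.getD_insert]
        by_cases hq : q = createStringList_prefixOf k
        · subst hq; simp
        · have : ((createStringList_prefixOf k == q) = false) := by
            simp [BEq.beq]; exact fun e => hq e.symm
          simp [h q, hq]
      · rw [hstep, if_neg hz]
        have hmem : createStringList_prefixOf k ∈ s := by
          by_contra hn; exact hz ((h _).mpr hn)
        have hadd : PySem.Set.add s (createStringList_prefixOf k) = s := by
          simp [PySem.Set.add, hmem]
        rw [hadd]
        exact ih _ _ h

-- B's backward filtering pass, seen as a foldr, related to forward Set.add accumulation:
-- foldl Set.add s ps = s ++ (those elements of B's dedup of ps that are not already in s)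
theorem createStringList_addB (ks : List String) (s : List String) :
    (ks.map createStringList_prefixOf).foldl PySem.Set.add s =
      s ++ (ks.foldr (fun k acc => createStringList_altStep acc k) []).filter
            (fun x => decide (x ∉ s)) := by
  induction ks generalizing s with
  | nil => simp
  | cons k ks ih =>
      simp only [List.map_cons, List.foldl_cons, List.foldr_cons]
      rw [ih]
      set p := createStringList_prefixOf k with hpdef
      by_cases hp : p ∈ s
      · have hadd : PySem.Set.add s p = s := by simp [PySem.Set.add, hp]
        rw [hadd]
        congr 1
        simp only [createStringList_altStep, ← hpdef, List.filter_cons]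
        have hf : (decide (p ∉ s)) = false := by simp [hp]
        rw [hf]
        simp only [Bool.false_eq_true, if_false, List.filter_filter]
        apply List.filter_congr
        intro x _
        by_cases hx : x ∈ s
        · simp [hx]
        · have hxp : x ≠ p := fun e => hx (e ▸ hp)
          simp [hx, hxp]
      · have hadd : PySem.Set.add s p = s ++ [p] := by simp [PySem.Set.add, hp]
        rw [hadd, List.append_assoc]
        congr 1
        simp only [createStringList_altStep, ← hpdef, List.filter_cons]
        have ht : (decide (p ∉ s)) = true := by simp [hp]
        rw [ht]
        simp only [if_true, List.filter_filter, List.singleton_append]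
        congr 1
        apply List.filter_congr
        intro x _
        by_cases hxp : x = p
        · simp [hxp, hp]
        · by_cases hx : x ∈ s <;> simp [hx, hxp]

-- ===== VERDICT (by name: the statement is the Claim_ definition above) =====
theorem createStringList_spec : Claim_equal_createStringList := by
  intro CONFIG _
  unfold Spec_createStringList createStringList createStringList_alt
  have h0 : ∀ p, (((PySem.Dict.ofList CONFIG).keys).foldl createStringList_checkStep
      PySem.Dict.empty).getD p 0 = 0 :=
    createStringList_checked_zero _ _ (fun p => by simp [PySem.Dict.getD, PySem.Dict.empty, PySem.Dict.get?])
  rw [createStringList_loop _ _ _ (fun p => by simp [h0 p])]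
  rw [createStringList_addB]
  simp [List.foldl_reverse]
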